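-- pv_equiv track=rewrite | github.com/fritzy/SleekXMPP | sleekxmpp/jid.py | _unescape_node
-- ===== SOURCE A (Python) =====
-- JID_ESCAPE_SEQUENCES = set(['\\20', '\\22', '\\26', '\\27', '\\2f',
--                             '\\3a', '\\3c', '\\3e', '\\40', '\\5c'])
--
-- JID_UNESCAPE_TRANSFORMATIONS = {'\\20': ' ',
--                                 '\\22': '"',
--                                 '\\26': '&',
--                                 '\\27': "'",
--                                 '\\2f': '/',
--                                 '\\3a': ':',
--                                 '\\3c': '<',
--                                 '\\3e': '>',
--                                 '\\40': '@',
--                                 '\\5c': '\\'}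
--
-- def _unescape_node(node):
--     unescaped = []
--     seq = ''
--     for i, char in enumerate(node):
--         if char == '\\':
--             seq = node[i:i+3]
--             if seq not in JID_ESCAPE_SEQUENCES:
--                 seq = ''
--         if seq:
--             if len(seq) == 3:
--                 unescaped.append(JID_UNESCAPE_TRANSFORMATIONS.get(seq, char))
--
--             # Pop character off the escape sequence, and ignore it
--             seq = seq[1:]
--         else:
--             unescaped.append(char)
--     unescaped = ''.join(unescaped)
--
--     return unescaped
-- ===== SOURCE B (Python) =====
-- JID_UNESCAPE_CODES = {'20': ' ',
--                       '22': '"',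
--                       '26': '&',
--                       '27': "'",
--                       '2f': '/',
--                       '3a': ':',
--                       '3c': '<',
--                       '3e': '>',
--                       '40': '@',
--                       '5c': '\\'}
--
-- def _unescape_node(node):
--     out = []
--     i = 0
--     n = len(node)
--     while i < n:
--         if node[i] == '\\' and node[i+1:i+3] in JID_UNESCAPE_CODES:
--             out.append(JID_UNESCAPE_CODES[node[i+1:i+3]])
--             i += 3
--         else:
--             out.append(node[i])
--             i += 1
--     return ''.join(out)
-- ===== Notes on version B (the rewrite author's own statement) =====
-- stated objective: simpler
-- what changed: Replaces the per-character state machine (a 'seq' string popped one char per iteration across three loop iterations) with a stride loop that, at each backslash, looks up the next two characters in a code table and jumps the index by 3 on a hit, by 1 otherwise.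
import Mathlib
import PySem

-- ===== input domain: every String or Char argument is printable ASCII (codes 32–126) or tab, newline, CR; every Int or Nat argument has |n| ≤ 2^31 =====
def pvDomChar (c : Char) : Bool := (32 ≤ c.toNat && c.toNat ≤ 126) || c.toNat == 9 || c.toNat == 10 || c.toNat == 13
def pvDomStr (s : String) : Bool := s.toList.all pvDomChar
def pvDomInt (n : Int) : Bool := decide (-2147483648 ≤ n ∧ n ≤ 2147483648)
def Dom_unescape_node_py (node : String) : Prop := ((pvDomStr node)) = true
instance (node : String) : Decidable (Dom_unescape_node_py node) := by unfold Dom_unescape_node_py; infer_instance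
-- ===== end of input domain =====

-- B replaces A's per-character 'seq' state machine with a stride loop that jumps 3 chars at each
-- recognised escape; objective: simpler (same O(n) cost).

-- ===== PORT A =====
-- JID_ESCAPE_SEQUENCES (a set of 3-char strings, as lists of chars)
def pvEscSet : List (List Char) :=
  [['\\','2','0'], ['\\','2','2'], ['\\','2','6'], ['\\','2','7'], ['\\','2','f'],
   ['\\','3','a'], ['\\','3','c'], ['\\','3','e'], ['\\','4','0'], ['\\','5','c']]

-- JID_UNESCAPE_TRANSFORMATIONS (dict: 3-char sequence → replacement char)
def pvTransform : List (List Char × Char) :=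
  [(['\\','2','0'], ' '), (['\\','2','2'], '"'), (['\\','2','6'], '&'),
   (['\\','2','7'], '\''), (['\\','2','f'], '/'), (['\\','3','a'], ':'),
   (['\\','3','c'], '<'), (['\\','3','e'], '>'), (['\\','4','0'], '@'),
   (['\\','5','c'], '\\')]

-- the body of A's `for i, char in enumerate(node)` loop: `rest` is node[i:] (so node[i:i+3] is
-- rest.take 3 and char is rest.head), `seq` is the loop-carried escape-sequence state
def pvLoopA (rest : List Char) (seq : List Char) : List Char :=
  match rest with
  | [] => []
  | ch :: tl =>
    let seq1 : List Char :=
      if ch = '\\' then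
        (if (ch :: tl).take 3 ∈ pvEscSet then (ch :: tl).take 3 else [])
      else seq
    if seq1 ≠ [] then
      (if seq1.length = 3 then [((List.lookup seq1 pvTransform).getD ch)] else [])
        ++ pvLoopA tl (seq1.drop 1)
    else
      ch :: pvLoopA tl seq1

def unescape_node_py (node : String) : String := String.ofList (pvLoopA node.toList [])

-- ===== PORT B =====
-- JID_UNESCAPE_CODES: the two hex chars after the backslash → replacement char
def pvCodes : List ((Char × Char) × Char) :=
  [(('2','0'), ' '), (('2','2'), '"'), (('2','6'), '&'), (('2','7'), '\''), (('2','f'), '/'),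
   (('3','a'), ':'), (('3','c'), '<'), (('3','e'), '>'), (('4','0'), '@'), (('5','c'), '\\')]

def pvCode2 (a b : Char) : Option Char := List.lookup (a, b) pvCodes

-- B's `while i < n` stride loop: on '\' followed by a known code consume 3 chars, else 1
def pvLoopB (cs : List Char) : List Char :=
  match cs with
  | [] => []
  | c :: a :: b :: tl' =>
    if c = '\\' then
      match pvCode2 a b with
      | some d => d :: pvLoopB tl'
      | none => c :: pvLoopB (a :: b :: tl')
    else
      c :: pvLoopB (a :: b :: tl')
  | c :: tl => c :: pvLoopB tl
termination_by cs.length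
decreasing_by all_goals simp <;> omega

def unescape_node_py_alt (node : String) : String := String.ofList (pvLoopB node.toList)

-- ===== PRECONDITION & SPEC =====
def Spec_unescape_node_py (node : String) (out : String) : Prop := out = unescape_node_py_alt node
instance (node : String) (out : String) : Decidable (Spec_unescape_node_py node out) := by unfold Spec_unescape_node_py; infer_instance

-- ===== CLAIM (what is proved, stated in full; the proofs are below) =====
def Claim_equal_unescape_node_py : Prop := ∀ (node : String), Dom_unescape_node_py node → Spec_unescape_node_py node (unescape_node_py node)

-- ===== LEMMAS AND PROOFS =====

lemma mem_esc_iff (a b : Char) : ['\\',a,b] ∈ pvEscSet ↔ (pvCode2 a b).isSome := by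
  simp [pvEscSet, pvCode2, pvCodes, List.lookup]
  repeat' (split <;> simp_all)

lemma pvLoopB_ne (c : Char) (tl : List Char) (hc : ¬ c = '\\') : pvLoopB (c :: tl) = c :: pvLoopB tl := by
  match tl with
  | [] => simp [pvLoopB]
  | [a] => simp [pvLoopB]
  | a :: b :: tl' => simp [pvLoopB, hc]

theorem pvLoop_eq : ∀ (cs : List Char), pvLoopA cs [] = pvLoopB cs := by
  intro cs
  induction hn : cs.length using Nat.strong_induction_on generalizing cs with
  | _ n ih =>
  subst hn
  match cs with
  | [] => simp [pvLoopA, pvLoopB]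
  | c :: tl =>
    by_cases hc : c = '\\'
    · subst hc
      match tl with
      | [] => simp [pvLoopA, pvLoopB, pvEscSet]
      | [a] =>
        by_cases ha : a = '\\' <;>
          simp [pvLoopA, pvLoopB, pvEscSet, ha]
      | a :: b :: tl' =>
        by_cases hm : ['\\', a, b] ∈ pvEscSet
        · have hs := (mem_esc_iff a b).mp hm
          simp only [pvEscSet, List.mem_cons, List.not_mem_nil, or_false] at hm
          rcases hm with h|h|h|h|h|h|h|h|h|h <;>
            (simp only [List.cons.injEq, true_and, and_true] at h
             obtain ⟨ha, hb⟩ := h; subst ha; subst hb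
             simp [pvLoopA, pvLoopB, pvEscSet, pvCode2, pvCodes, pvTransform, List.lookup, BEq.beq, List.beq]
             exact ih tl'.length (by simp; omega) tl' rfl)
        · have h0 : pvCode2 a b = none := by
            cases hpc : pvCode2 a b with
            | none => rfl
            | some d => exact absurd ((mem_esc_iff a b).mpr (by simp [hpc])) hm
          have hA : pvLoopA ('\\' :: a :: b :: tl') [] = '\\' :: pvLoopA (a :: b :: tl') [] := by
            rw [pvLoopA.eq_def]; simp [hm]
          have hB : pvLoopB ('\\' :: a :: b :: tl') = '\\' :: pvLoopB (a :: b :: tl') := by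
            rw [pvLoopB.eq_def]; simp [h0]
          rw [hA, hB]
          exact congrArg _ (ih (a :: b :: tl').length (by simp) _ rfl)
    · rw [pvLoopB_ne c tl hc]
      rw [pvLoopA.eq_def]; simp only [hc, if_false]
      simp only [if_neg (by simp : ¬ (([] : List Char) ≠ []))]
      exact congrArg _ (ih tl.length (by simp) tl rfl)

-- ===== VERDICT (by name: the statement is the Claim_ definition above) =====
theorem unescape_node_py_spec : Claim_equal_unescape_node_py := by
  intro node _
  unfold Spec_unescape_node_py unescape_node_py unescape_node_py_alt
  rw [pvLoop_eq]
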